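-- pv_equiv track=rewrite | github.com/yinfox/tg-file-monitor | scripts/update_drama_calendar_env.py | _extract_env_value_by_key
-- ===== SOURCE A (Python) =====
-- def _extract_env_value_by_key(env_content: str, key: str) -> str:
--     for line in (env_content or "").splitlines():
--         stripped = line.strip()
--         if not stripped or stripped.startswith("#") or "=" not in line:
--             continue
--         left, raw_v = line.split("=", 1)
--         if left.strip() == key:
--             return _strip_quotes(raw_v)
--     return ""
--
-- def _strip_quotes(v: str) -> str:
--     v = (v or '').strip()
--     if len(v) >= 2 and ((v[0] == '"' and v[-1] == '"') or (v[0] == "'" and v[-1] == "'")):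
--         return v[1:-1]
--     return v
-- ===== SOURCE B (Python) =====
-- def _extract_env_value_by_key(env_content: str, key: str) -> str:
--     table = {}
--     for line in (env_content or "").splitlines():
--         stripped = line.strip()
--         if not stripped or stripped.startswith("#") or "=" not in line:
--             continue
--         left, raw_v = line.split("=", 1)
--         table.setdefault(left.strip(), raw_v)
--     return _strip_quotes(table.get(key, ""))
--
-- def _strip_quotes(v: str) -> str:
--     v = (v or '').strip()
--     if len(v) >= 2 and ((v[0] == '"' and v[-1] == '"') or (v[0] == "'" and v[-1] == "'")):
--         return v[1:-1]
--     return v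
-- ===== Notes on version B (the rewrite author's own statement) =====
-- stated objective: alternative
-- what changed: Replaces the scan-until-first-match loop with a single pass that builds a first-wins key->value table (dict.setdefault) followed by one lookup, so the traversal shape is build-table-then-lookup instead of early-return scanning.
import Mathlib
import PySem

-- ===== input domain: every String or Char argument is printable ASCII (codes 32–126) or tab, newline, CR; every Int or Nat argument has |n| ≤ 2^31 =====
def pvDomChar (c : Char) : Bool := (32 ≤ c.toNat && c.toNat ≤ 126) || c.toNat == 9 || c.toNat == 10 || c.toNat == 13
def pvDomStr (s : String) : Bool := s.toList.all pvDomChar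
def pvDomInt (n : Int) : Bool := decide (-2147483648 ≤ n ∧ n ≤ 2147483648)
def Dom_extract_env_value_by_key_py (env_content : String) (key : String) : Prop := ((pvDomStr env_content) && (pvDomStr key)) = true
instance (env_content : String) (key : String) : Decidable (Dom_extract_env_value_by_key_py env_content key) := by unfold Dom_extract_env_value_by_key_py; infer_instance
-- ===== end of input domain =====

-- B replaces A's scan-until-first-match loop with build-a-first-wins-table (dict.setdefault) then one lookup; objective: alternative (same cost, different traversal shape).

-- ===== PORT A =====
-- helper _strip_quotes, shared verbatim by both Pythons
def pvStripQuotes (v : String) : String :=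
  let v := PySem.Str.strip v    -- (v or '').strip(): 'or' is the identity on str here ("" stays "")
  if 2 ≤ PySem.Str.len v ∧
      ((PySem.Str.pyGet? v 0 = some '"' ∧ PySem.Str.pyGet? v (-1) = some '"') ∨
       (PySem.Str.pyGet? v 0 = some '\'' ∧ PySem.Str.pyGet? v (-1) = some '\'')) then
    PySem.Str.slice v (some 1) (some (-1))
  else v

-- the identical skip/split code of the loop body of both Pythons: none = 'continue',
-- some (left.strip(), raw_v) otherwise ('=' in line guarantees split('=', 1) yields two parts)
def pvParseLine (line : String) : Option (String × String) :=
  let stripped := PySem.Str.strip line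
  if stripped = "" ∨ PySem.Str.startswith stripped "#" = true ∨ PySem.Str.isIn "=" line = false then
    none
  else
    let parts := (PySem.Str.splitMax? line "=" 1).getD []
    some (PySem.Str.strip (parts.getD 0 ""), parts.getD 1 "")

-- A's for-loop with early return, as structural recursion over the lines
def pvScanA (lines : List String) (key : String) : String :=
  match lines with
  | [] => ""
  | line :: rest =>
    match pvParseLine line with
    | none => pvScanA rest key
    | some (left, raw_v) => if left = key then pvStripQuotes raw_v else pvScanA rest key

def extract_env_value_by_key_py (env_content : String) (key : String) : String :=
  pvScanA (PySem.Str.splitlines (if env_content = "" then "" else env_content)) key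

-- ===== PORT B =====
def extract_env_value_by_key_py_alt (env_content : String) (key : String) : String :=
  let table :=
    (PySem.Str.splitlines (if env_content = "" then "" else env_content)).foldl
      (fun d line =>
        match pvParseLine line with
        | none => d
        | some (left, raw_v) => d.setdefault left raw_v)
      (PySem.Dict.empty : PySem.Dict String String)
  pvStripQuotes (table.getD key "")

-- ===== PRECONDITION & SPEC =====
def Spec_extract_env_value_by_key_py (env_content : String) (key : String) (out : String) : Prop := out = extract_env_value_by_key_py_alt env_content key
instance (env_content : String) (key : String) (out : String) : Decidable (Spec_extract_env_value_by_key_py env_content key out) := by unfold Spec_extract_env_value_by_key_py; infer_instance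

-- ===== CLAIM (what is proved, stated in full; the proofs are below) =====
def Claim_equal_extract_env_value_by_key_py : Prop := ∀ (env_content : String) (key : String), Dom_extract_env_value_by_key_py env_content key → Spec_extract_env_value_by_key_py env_content key (extract_env_value_by_key_py env_content key)

-- ===== LEMMAS AND PROOFS =====
-- Invariant of B's table-building fold: with accumulated dict d, stripping the final lookup
-- equals pvStripQuotes of the value already stored for key (first-wins), else A's scan of the rest.
theorem pvFold_invariant (lines : List String) (key : String) (d : PySem.Dict String String) :
    pvStripQuotes ((lines.foldl
        (fun d line =>
          match pvParseLine line with
          | none => d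
          | some (left, raw_v) => d.setdefault left raw_v) d).getD key "") =
      (match d.get? key with
       | some v => pvStripQuotes v
       | none => pvScanA lines key) := by
  induction lines generalizing d with
  | nil =>
    simp only [List.foldl_nil, PySem.Dict.getD_eq_get?_getD]
    cases h : d.get? key with
    | some v => simp
    | none => simp [pvScanA]; rfl
  | cons line rest ih =>
    simp only [List.foldl_cons]
    cases hp : pvParseLine line with
    | none => rw [ih]; simp [pvScanA, hp]
    | some pr =>
      obtain ⟨left, raw_v⟩ := pr
      rw [ih]
      by_cases hk : left = key
      · subst hk
        cases h : d.get? left with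
        | some v =>
          rw [PySem.Dict.get?_setdefault_self, h]
          simp
        | none =>
          rw [PySem.Dict.get?_setdefault_self, h]
          simp [pvScanA, hp]
      · rw [PySem.Dict.get?_setdefault_of_ne d raw_v (Ne.symm hk)]
        cases h : d.get? key with
        | some v => simp
        | none => simp [pvScanA, hp, hk]

theorem pvEmpty_get?_none (key : String) :
    (PySem.Dict.empty : PySem.Dict String String).get? key = none := by
  simp [PySem.Dict.empty, PySem.Dict.get?]

-- ===== VERDICT (by name: the statement is the Claim_ definition above) =====
theorem extract_env_value_by_key_py_spec : Claim_equal_extract_env_value_by_key_py := by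
  intro env_content key _
  unfold Spec_extract_env_value_by_key_py
  unfold extract_env_value_by_key_py extract_env_value_by_key_py_alt
  rw [pvFold_invariant, pvEmpty_get?_none]
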